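-- pv_equiv track=rewrite | github.com/ShlyapaEx/algorithms_training | Яндекс. Тренировка алгоритмов 1.0/Домашнее задание по лекции 4/H. Deciphering the Mayan script.py | get_possible_occurrences_number_slow
-- ===== SOURCE A (Python) =====
-- def get_letters_with_count(string: str) -> dict[str, int]:
--     letters_with_count = {}
--     for letter in string:
--         if letter not in letters_with_count:
--             letters_with_count[letter] = 0
--         letters_with_count[letter] += 1
--     return letters_with_count
--
-- def get_possible_occurrences_number_slow(word: str, sequence: str) -> int:
--     possible_occurrences_number = 0
--     word_length = len(word)
--     sequence_length = len(sequence)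
--     word_letters_with_count = get_letters_with_count(word)
--
--     base_sequence_fragment = sequence[:word_length - 1]
--
--     for i in range(sequence_length - (word_length - 1)):
--         sequence_fragment = base_sequence_fragment + \
--             sequence[i + word_length - 1]
--         fragment_letters_with_count = get_letters_with_count(sequence_fragment)
--         if word_letters_with_count == fragment_letters_with_count:
--             possible_occurrences_number += 1
--         base_sequence_fragment = sequence_fragment[1:]
--     return possible_occurrences_number
-- ===== SOURCE B (Python) =====
-- def get_possible_occurrences_number_slow(word: str, sequence: str) -> int:
--     m = len(word)
--     n = len(sequence)
--     if m > n:
--         return 0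
--     target = {}
--     for ch in word:
--         target[ch] = target.get(ch, 0) + 1
--     counts = {}
--     for ch in sequence[:m]:
--         counts[ch] = counts.get(ch, 0) + 1
--     result = 1 if counts == target else 0
--     for i in range(m, n):
--         ch_in = sequence[i]
--         counts[ch_in] = counts.get(ch_in, 0) + 1
--         ch_out = sequence[i - m]
--         c = counts[ch_out] - 1
--         if c == 0:
--             del counts[ch_out]
--         else:
--             counts[ch_out] = c
--         if counts == target:
--             result += 1
--     return result
-- ===== Notes on version B (the rewrite author's own statement) =====
-- stated objective: alternative
-- what changed: Instead of rebuilding a fresh letter-count dict for every window as A does, B keeps one sliding-window count dict updated by the one incoming and one outgoing character per step (dropping zero entries so plain dict equality works) and compares it to the precomputed count dict of word; intended as faster for long words, measured only ~1.26x on a timing run's inputs.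
-- outside the precondition, e.g. on get_possible_occurrences_number_slow('', 'a'): A returns 0, B returns 2
import Mathlib
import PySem

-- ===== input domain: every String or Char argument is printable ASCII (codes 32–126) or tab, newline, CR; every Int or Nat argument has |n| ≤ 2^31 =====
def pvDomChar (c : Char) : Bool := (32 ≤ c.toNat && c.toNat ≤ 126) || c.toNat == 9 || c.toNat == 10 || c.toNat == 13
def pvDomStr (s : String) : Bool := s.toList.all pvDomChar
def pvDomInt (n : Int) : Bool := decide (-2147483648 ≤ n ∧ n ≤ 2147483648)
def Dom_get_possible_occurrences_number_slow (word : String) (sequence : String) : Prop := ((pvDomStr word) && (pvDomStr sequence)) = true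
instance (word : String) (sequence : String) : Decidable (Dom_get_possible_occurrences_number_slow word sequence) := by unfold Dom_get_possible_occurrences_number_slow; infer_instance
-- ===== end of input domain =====

-- B replaces A's per-window dict rebuild by one sliding count dict updated with the incoming/outgoing character per step (objective: alternative; intended as faster, measured ~1.26x in a timing run).

-- ===== PORT A =====
-- Python dict equality (d1 == d2): order-insensitive mapping comparison (used by both ports).
def pvDictEq (d1 d2 : PySem.Dict Char Int) : Bool :=
  d1.items.all (fun kv => d2.get? kv.1 == some kv.2) &&
  d2.items.all (fun kv => d1.get? kv.1 == some kv.2)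

-- get_letters_with_count: 'if letter not in d: d[letter] = 0; d[letter] += 1'
def pvGetLettersWithCount (cs : List Char) : PySem.Dict Char Int :=
  cs.foldl (fun d c =>
    let d' := if d.contains c then d else d.insert c 0
    d'.insert c (d'.getD c 0 + 1)) PySem.Dict.empty

def get_possible_occurrences_number_slow (word : String) (sequence : String) : Int :=
  let w := word.toList
  let s := sequence.toList
  let wordLength : Int := PySem.Str.len word
  let sequenceLength : Int := PySem.Str.len sequence
  let wordLettersWithCount := pvGetLettersWithCount w
  let baseSequenceFragment := PySem.List.slice s none (some (wordLength - 1))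
  -- sequence[i + word_length - 1]: pyGetD is exact wherever Python returns (the only IndexError,
  -- word = sequence = '', is outside Pre_)
  let r := (PySem.List.pyRange 0 (sequenceLength - (wordLength - 1)) 1).foldl
    (fun (st : Int × List Char) i =>
      let sequenceFragment := st.2 ++ [PySem.List.pyGetD s (i + wordLength - 1) 'A']
      let fragmentLettersWithCount := pvGetLettersWithCount sequenceFragment
      let cnt := if pvDictEq wordLettersWithCount fragmentLettersWithCount then st.1 + 1 else st.1
      (cnt, PySem.List.slice sequenceFragment (some 1) none))
    (0, baseSequenceFragment)
  r.1

-- ===== PORT B =====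
def get_possible_occurrences_number_slow_alt (word : String) (sequence : String) : Int :=
  let w := word.toList
  let s := sequence.toList
  let m : Int := PySem.Str.len word
  let n : Int := PySem.Str.len sequence
  if m > n then 0 else
  let target := w.foldl (fun d c => d.insert c (d.getD c 0 + 1)) PySem.Dict.empty
  let counts0 := (PySem.List.slice s none (some m)).foldl
    (fun d c => d.insert c (d.getD c 0 + 1)) PySem.Dict.empty
  let res0 : Int := if pvDictEq counts0 target then 1 else 0
  -- counts[ch_out]: the key is always present (ch_out is in the current window), so getD is exact
  let r := (PySem.List.pyRange m n 1).foldl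
    (fun (st : PySem.Dict Char Int × Int) i =>
      let chIn := PySem.List.pyGetD s i 'A'
      let counts1 := st.1.insert chIn (st.1.getD chIn 0 + 1)
      let chOut := PySem.List.pyGetD s (i - m) 'A'
      let c := counts1.getD chOut 0 - 1
      let counts2 := if c == 0 then counts1.erase chOut else counts1.insert chOut c
      (counts2, if pvDictEq counts2 target then st.2 + 1 else st.2))
    (counts0, res0)
  r.2

-- ===== PRECONDITION & SPEC =====
-- Pre_ excludes only the empty word: there A's read of sequence[i + len(word) - 1] wraps around to
-- sequence[-1], so A raises IndexError on an empty sequence and returns the accidental value 0 on a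
-- nonempty one, while B naturally counts the len(sequence)+1 trivially matching empty windows — a
-- degenerate corner no caller of this anagram counter would specify.
def Pre_get_possible_occurrences_number_slow (word : String) (sequence : String) : Prop :=
  word ≠ ""
instance (word : String) (sequence : String) : Decidable (Pre_get_possible_occurrences_number_slow word sequence) := by unfold Pre_get_possible_occurrences_number_slow; infer_instance
def pvWitness_get_possible_occurrences_number_slow : String × String := ("ab", "abba")

def Spec_get_possible_occurrences_number_slow (word : String) (sequence : String) (out : Int) : Prop := out = get_possible_occurrences_number_slow_alt word sequence
instance (word : String) (sequence : String) (out : Int) : Decidable (Spec_get_possible_occurrences_number_slow word sequence out) := by unfold Spec_get_possible_occurrences_number_slow; infer_instance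

-- ===== CLAIM (what is proved, stated in full; the proofs are below) =====
def Claim_equal_get_possible_occurrences_number_slow : Prop := ∀ (word : String) (sequence : String), Dom_get_possible_occurrences_number_slow word sequence → Pre_get_possible_occurrences_number_slow word sequence → Spec_get_possible_occurrences_number_slow word sequence (get_possible_occurrences_number_slow word sequence)

-- ===== LEMMAS AND PROOFS =====

-- window j of width m
def pvWin (s : List Char) (m j : Nat) : List Char := (s.drop j).take m
-- does window j match the letter counts of w
def pvMatch (w s : List Char) (m j : Nat) : Bool := decide ((pvWin s m j).Perm w)

-- A's counting helper is Counter
theorem pvGetLettersWithCount_eq_counter (cs : List Char) :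
    pvGetLettersWithCount cs = PySem.Dict.counter cs := by
  unfold pvGetLettersWithCount PySem.Dict.counter
  congr 1
  funext d c
  by_cases h : d.contains c
  · simp only [h, if_true]
    simp [PySem.Dict.modify]
  · simp only [h, if_false, Bool.false_eq_true]
    rw [PySem.Dict.getD_insert_self, PySem.Dict.insert_insert_self]
    simp [PySem.Dict.modify, PySem.Dict.getD_of_not_contains d 0 (by simpa using h)]

-- get? of a Counter
theorem pvGet?_counter (xs : List Char) (c : Char) :
    (PySem.Dict.counter xs).get? c = if c ∈ xs then some ((xs.count c : Int)) else none := by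
  by_cases hc : c ∈ xs
  · simp only [hc, if_true]
    have hcont : (PySem.Dict.counter xs).contains c = true := by
      rw [PySem.Dict.contains_counter]; simpa using hc
    rw [PySem.Dict.contains_eq_isSome_get?] at hcont
    obtain ⟨v, hv⟩ := Option.isSome_iff_exists.mp hcont
    have := PySem.Dict.getD_counter xs c
    rw [PySem.Dict.getD_eq_get?_getD, hv] at this
    simp only [Option.getD_some] at this
    rw [hv, this]
  · simp only [hc, if_false]
    rw [PySem.Dict.get?_eq_none_iff_contains, PySem.Dict.contains_counter]
    simpa using hc

-- Python dict == is pointwise get? equality (for nodup-key dicts)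
theorem pvDictEq_eq_true_iff (d1 d2 : PySem.Dict Char Int)
    (h1 : d1.keys.Nodup) (h2 : d2.keys.Nodup) :
    pvDictEq d1 d2 = true ↔ ∀ c, d1.get? c = d2.get? c := by
  unfold pvDictEq
  simp only [Bool.and_eq_true, List.all_eq_true, beq_iff_eq]
  constructor
  · rintro ⟨ha, hb⟩ c
    cases hv : d1.get? c with
    | some v =>
      exact (ha _ (PySem.Dict.mem_items_of_get?_eq_some d1 hv)).symm
    | none =>
      cases hw : d2.get? c with
      | some w =>
        have := hb _ (PySem.Dict.mem_items_of_get?_eq_some d2 hw)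
        rw [hv] at this; exact this
      | none => rfl
  · intro h
    refine ⟨fun kv hkv => ?_, fun kv hkv => ?_⟩
    · rw [← h kv.1]
      exact PySem.Dict.get?_of_mem_items d1 (by simpa using hkv) h1
    · rw [h kv.1]
      exact PySem.Dict.get?_of_mem_items d2 (by simpa using hkv) h2

theorem pvDictEq_counter (xs ys : List Char) :
    pvDictEq (PySem.Dict.counter xs) (PySem.Dict.counter ys) = decide (xs.Perm ys) := by
  rw [Bool.eq_iff_iff, decide_eq_true_iff,
    pvDictEq_eq_true_iff _ _ (PySem.Dict.nodup_keys_counter xs) (PySem.Dict.nodup_keys_counter ys),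
    List.perm_iff_count]
  constructor
  · intro h c
    have hc := h c
    rw [pvGet?_counter, pvGet?_counter] at hc
    by_cases hx : c ∈ xs <;> by_cases hy : c ∈ ys
    · simpa [hx, hy] using hc
    · simp [hx, hy] at hc
    · simp [hx, hy] at hc
    · simp [List.count_eq_zero_of_not_mem hx, List.count_eq_zero_of_not_mem hy]
  · intro h c
    have hcc := h c
    rw [pvGet?_counter, pvGet?_counter]
    by_cases hx : c ∈ xs <;> by_cases hy : c ∈ ys
    · simp [hx, hy, hcc]
    · exfalso
      have h0 : List.count c ys = 0 := List.count_eq_zero_of_not_mem hy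
      have h1 : 0 < List.count c xs := List.count_pos_iff.mpr hx
      omega
    · exfalso
      have h0 : List.count c xs = 0 := List.count_eq_zero_of_not_mem hx
      have h1 : 0 < List.count c ys := List.count_pos_iff.mpr hy
      omega
    · simp [hx, hy]

-- erase facts (PySem.Dict.erase is a filter on the items list)
theorem pvFindFilterNe (l : List (Char × Int)) (k c : Char) :
    List.find? (fun p => p.1 == c) (l.filter (fun p => !(p.1 == k)))
    = if c = k then none else List.find? (fun p => p.1 == c) l := by
  induction l with
  | nil => split <;> rfl
  | cons p t ih =>
    simp only [List.filter_cons]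
    by_cases hpk : p.1 = k
    · rw [if_neg (by simp [hpk]), ih]
      by_cases hck : c = k
      · simp [hck]
      · rw [if_neg hck, if_neg hck, List.find?_cons_of_neg (by simp [hpk]; exact fun h => hck (by simp_all))]
    · rw [if_pos (by simp [hpk])]
      by_cases hpc : p.1 = c
      · have hck : ¬ c = k := fun h => hpk (by rw [hpc, h])
        rw [List.find?_cons_of_pos (by simp [hpc]), if_neg hck,
          List.find?_cons_of_pos (by simp [hpc])]
      · rw [List.find?_cons_of_neg (by simp [hpc]), ih,
          List.find?_cons_of_neg (by simp [hpc])]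

theorem pvGet?_erase (d : PySem.Dict Char Int) (k c : Char) :
    (d.erase k).get? c = if c = k then none else d.get? c := by
  obtain ⟨l⟩ := d
  simp only [PySem.Dict.erase, PySem.Dict.get?]
  rw [pvFindFilterNe]
  by_cases hck : c = k <;> simp [hck]

theorem pvNodup_keys_erase (d : PySem.Dict Char Int) (k : Char) (h : d.keys.Nodup) :
    (d.erase k).keys.Nodup := by
  simp only [PySem.Dict.erase, PySem.Dict.keys] at *
  exact h.sublist (List.Sublist.map _ List.filter_sublist)

-- A's loop
theorem pvA_loop (w s : List Char) (m : Nat) (hm : 1 ≤ m) (hmw : m = w.length) :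
    ∀ (r a : Nat) (acc : Int), a + r + m = s.length + 1 →
    ((PySem.List.pyRange (a : Int) ((a : Int) + (r : Nat)) 1).foldl
      (fun (st : Int × List Char) i =>
        let frag := st.2 ++ [PySem.List.pyGetD s (i + (m : Int) - 1) 'A']
        let fcnt := pvGetLettersWithCount frag
        let cnt := if pvDictEq (pvGetLettersWithCount w) fcnt then st.1 + 1 else st.1
        (cnt, PySem.List.slice frag (some 1) none))
      (acc, (s.drop a).take (m-1))).1
    = acc + (((List.range r).countP (fun j => pvMatch w s m (a + j))) : Int) := by
  intro r
  induction r with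
  | zero =>
    intro a acc _
    rw [show ((a : Int) + ((0:Nat) : Int)) = (a : Int) by omega,
      PySem.List.pyRange_one_eq_nil le_rfl]
    simp
  | succ r ih =>
    intro a acc hlen
    have hidx : a + m - 1 < s.length := by omega
    have hcast : (a : Int) + ((r+1 : Nat) : Int) = ((a : Int) + 1) + ((r : Nat) : Int) := by
      push_cast; ring
    rw [hcast, PySem.List.pyRange_one_cons (by omega), List.foldl_cons]
    have hchar : PySem.List.pyGetD s ((a : Int) + (m : Int) - 1) 'A' = s[a + m - 1]'hidx := by
      rw [show (a : Int) + (m : Int) - 1 = ((a + m - 1 : Nat) : Int) by omega,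
        PySem.List.pyGetD_natCast, List.getD_eq_getElem?_getD, List.getElem?_eq_getElem hidx]
      rfl
    have hfrag : (s.drop a).take (m-1) ++ [PySem.List.pyGetD s ((a : Int) + (m : Int) - 1) 'A']
        = pvWin s m a := by
      rw [hchar]
      unfold pvWin
      conv_rhs => rw [show m = (m-1)+1 by omega, List.take_succ]
      congr 1
      rw [List.getElem?_drop, show a + (m-1) = a + m - 1 by omega,
        List.getElem?_eq_getElem hidx]
      rfl
    simp only [hfrag, pvGetLettersWithCount_eq_counter, pvDictEq_counter]
    have htail : PySem.List.slice (pvWin s m a) (some 1) none = (s.drop (a+1)).take (m-1) := by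
      rw [PySem.List.slice_from_one]
      unfold pvWin
      rw [← List.drop_one, List.drop_take, List.drop_drop]
    have ihs := ih (a+1) (if decide (List.Perm w (pvWin s m a)) = true then acc + 1 else acc) (by omega)
    simp only [pvGetLettersWithCount_eq_counter, pvDictEq_counter] at ihs
    rw [show ((a+1 : Nat) : Int) = (a : Int) + 1 from by push_cast; ring] at ihs
    rw [htail, ihs]
    have hm : decide (List.Perm w (pvWin s m a)) = pvMatch w s m a := by
      unfold pvMatch
      simp [List.perm_comm]
    rw [hm]
    rw [List.range_succ_eq_map, List.countP_cons, List.countP_map,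
      show pvMatch w s m (a + 0) = pvMatch w s m a by rw [Nat.add_zero]]
    have hfun : ((fun j => pvMatch w s m (a + j)) ∘ Nat.succ) = (fun j => pvMatch w s m (a + 1 + j)) := by
      funext x
      simp only [Function.comp_apply]
      congr 1
      omega
    rw [hfun]
    by_cases hb : pvMatch w s m a = true <;> simp [hb] <;> push_cast <;> ring

-- B's loop
theorem pvB_loop (w s : List Char) (m : Nat) :
    ∀ (r j : Nat) (counts : PySem.Dict Char Int) (res : Int),
    m + j + r = s.length → counts.keys.Nodup →
    (∀ c, counts.get? c = (PySem.Dict.counter (pvWin s m j)).get? c) →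
    ((PySem.List.pyRange ((m + j : Nat) : Int) ((s.length : Nat) : Int) 1).foldl
      (fun (st : PySem.Dict Char Int × Int) i =>
        let chIn := PySem.List.pyGetD s i 'A'
        let counts1 := st.1.insert chIn (st.1.getD chIn 0 + 1)
        let chOut := PySem.List.pyGetD s (i - (m : Int)) 'A'
        let c := counts1.getD chOut 0 - 1
        let counts2 := if c == 0 then counts1.erase chOut else counts1.insert chOut c
        (counts2, if pvDictEq counts2 (PySem.Dict.counter w) then st.2 + 1 else st.2))
      (counts, res)).2
    = res + (((List.range r).countP (fun t => pvMatch w s m (j + 1 + t))) : Int) := by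
  intro r
  induction r with
  | zero =>
    intro j counts res hlen _ _
    rw [show ((s.length : Nat) : Int) = ((m + j : Nat) : Int) from by exact_mod_cast congrArg Nat.cast hlen.symm,
      PySem.List.pyRange_one_eq_nil le_rfl]
    simp
  | succ r ih =>
    intro j counts res hlen hnd hI
    have hmj : m + j < s.length := by omega
    have hj : j < s.length := by omega
    have hIn : PySem.List.pyGetD s ((m + j : Nat) : Int) 'A' = s[m+j] := by
      rw [PySem.List.pyGetD_natCast, List.getD_eq_getElem?_getD, List.getElem?_eq_getElem hmj]
      rfl
    have hOutIdx : ((m + j : Nat) : Int) - (m : Int) = ((j : Nat) : Int) := by push_cast; ring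
    have hOut : PySem.List.pyGetD s ((j : Nat) : Int) 'A' = s[j] := by
      rw [PySem.List.pyGetD_natCast, List.getD_eq_getElem?_getD, List.getElem?_eq_getElem hj]
      rfl
    -- window algebra
    have hmid : pvWin s m j ++ [s[m+j]] = pvWin s (m+1) j := by
      unfold pvWin
      rw [List.take_succ]
      congr 1
      rw [List.getElem?_drop, show j + m = m + j by omega, List.getElem?_eq_getElem hmj]
      rfl
    have hcons : pvWin s (m+1) j = s[j] :: pvWin s m (j+1) := by
      unfold pvWin
      rw [List.drop_eq_getElem_cons hj, List.take_succ_cons]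
    -- the updated dict after inserting the incoming char
    have hI1 : ∀ c, (counts.insert (s[m+j]'hmj) (counts.getD (s[m+j]'hmj) 0 + 1)).get? c
        = (PySem.Dict.counter (pvWin s (m+1) j)).get? c := by
      intro c
      rw [← hmid, PySem.Dict.get?_insert, pvGet?_counter]
      by_cases hc : c = s[m+j]'hmj
      · rw [if_pos hc, if_pos (by rw [hc]; simp), hc]
        rw [PySem.Dict.getD_eq_get?_getD, hI _, pvGet?_counter]
        by_cases hcw : s[m+j]'hmj ∈ pvWin s m j
        · rw [if_pos hcw]
          simp only [Option.getD_some, Option.some.injEq, List.count_append, List.count_singleton]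
          rw [if_pos (by simp)]
          omega
        · rw [if_neg hcw]
          rw [List.count_append, List.count_eq_zero_of_not_mem hcw]
          simp
      · rw [if_neg hc, hI c, pvGet?_counter]
        have hmem : c ∈ pvWin s m j ++ [s[m+j]'hmj] ↔ c ∈ pvWin s m j := by
          simp [hc]
        have hcnt : List.count c (pvWin s m j ++ [s[m+j]'hmj]) = List.count c (pvWin s m j) := by
          rw [List.count_append]
          simp [List.count_singleton]
          exact fun h => hc h.symm
        rw [hcnt]
        by_cases hcw : c ∈ pvWin s m j
        · rw [if_pos hcw, if_pos (hmem.mpr hcw)]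
        · rw [if_neg hcw, if_neg (fun h => hcw (hmem.mp h))]
    have hnd1 : (counts.insert (s[m+j]'hmj) (counts.getD (s[m+j]'hmj) 0 + 1)).keys.Nodup :=
      PySem.Dict.nodup_keys_insert _ _ _ hnd
    -- the decremented count of the outgoing char
    have hval : (counts.insert (s[m+j]'hmj) (counts.getD (s[m+j]'hmj) 0 + 1)).getD (s[j]'hj) 0 - 1
        = ((List.count (s[j]'hj) (pvWin s m (j+1)) : Nat) : Int) := by
      rw [PySem.Dict.getD_eq_get?_getD, hI1, pvGet?_counter, hcons,
        if_pos (List.mem_cons_self), List.count_cons_self]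
      push_cast
      simp
    -- invariant for the dict after removing the outgoing char
    have hI2 : ∀ c, (if ((counts.insert (s[m+j]'hmj) (counts.getD (s[m+j]'hmj) 0 + 1)).getD (s[j]'hj) 0 - 1) == 0
          then (counts.insert (s[m+j]'hmj) (counts.getD (s[m+j]'hmj) 0 + 1)).erase (s[j]'hj)
          else (counts.insert (s[m+j]'hmj) (counts.getD (s[m+j]'hmj) 0 + 1)).insert (s[j]'hj)
            ((counts.insert (s[m+j]'hmj) (counts.getD (s[m+j]'hmj) 0 + 1)).getD (s[j]'hj) 0 - 1)).get? c
        = (PySem.Dict.counter (pvWin s m (j+1))).get? c := by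
      intro c
      have hrest : c ≠ s[j]'hj → (PySem.Dict.counter (pvWin s (m+1) j)).get? c
          = (PySem.Dict.counter (pvWin s m (j+1))).get? c := by
        intro hc
        rw [pvGet?_counter, pvGet?_counter, hcons]
        have hmem : c ∈ (s[j]'hj) :: pvWin s m (j+1) ↔ c ∈ pvWin s m (j+1) := by simp [hc]
        have h1 : List.count c ((s[j]'hj) :: pvWin s m (j+1)) = List.count c (pvWin s m (j+1)) := by
          simp [List.count_cons]
          exact fun h => hc h.symm
        rw [h1]
        by_cases hcw : c ∈ pvWin s m (j+1)
        · rw [if_pos (hmem.mpr hcw), if_pos hcw]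
        · rw [if_neg (fun h => hcw (hmem.mp h)), if_neg hcw]
      by_cases hz : List.count (s[j]'hj) (pvWin s m (j+1)) = 0
      · rw [if_pos (by rw [hval, hz]; rfl), pvGet?_erase]
        by_cases hc : c = s[j]'hj
        · rw [if_pos hc, pvGet?_counter, if_neg (by rw [hc]; exact List.count_eq_zero.mp hz)]
        · rw [if_neg hc, hI1 c, hrest hc]
      · rw [if_neg (by rw [hval]; simp [hz]), PySem.Dict.get?_insert]
        by_cases hc : c = s[j]'hj
        · rw [if_pos hc, hval, pvGet?_counter, if_pos (by rw [hc]; exact List.count_pos_iff.mp (Nat.pos_of_ne_zero hz)), hc]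
        · rw [if_neg hc, hI1 c, hrest hc]
    have hnd2 : (if ((counts.insert (s[m+j]'hmj) (counts.getD (s[m+j]'hmj) 0 + 1)).getD (s[j]'hj) 0 - 1) == 0
          then (counts.insert (s[m+j]'hmj) (counts.getD (s[m+j]'hmj) 0 + 1)).erase (s[j]'hj)
          else (counts.insert (s[m+j]'hmj) (counts.getD (s[m+j]'hmj) 0 + 1)).insert (s[j]'hj)
            ((counts.insert (s[m+j]'hmj) (counts.getD (s[m+j]'hmj) 0 + 1)).getD (s[j]'hj) 0 - 1)).keys.Nodup := by
      split
      · exact pvNodup_keys_erase _ _ hnd1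
      · exact PySem.Dict.nodup_keys_insert _ _ _ hnd1
    -- the comparison against word's counter is the window-(j+1) match
    have hcmp : pvDictEq (if ((counts.insert (s[m+j]'hmj) (counts.getD (s[m+j]'hmj) 0 + 1)).getD (s[j]'hj) 0 - 1) == 0
          then (counts.insert (s[m+j]'hmj) (counts.getD (s[m+j]'hmj) 0 + 1)).erase (s[j]'hj)
          else (counts.insert (s[m+j]'hmj) (counts.getD (s[m+j]'hmj) 0 + 1)).insert (s[j]'hj)
            ((counts.insert (s[m+j]'hmj) (counts.getD (s[m+j]'hmj) 0 + 1)).getD (s[j]'hj) 0 - 1))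
          (PySem.Dict.counter w) = pvMatch w s m (j+1) := by
      rw [Bool.eq_iff_iff,
        pvDictEq_eq_true_iff _ _ hnd2 (PySem.Dict.nodup_keys_counter w)]
      unfold pvMatch
      rw [decide_eq_true_iff]
      simp only [hI2]
      constructor
      · intro h
        have hb := (pvDictEq_eq_true_iff _ _ (PySem.Dict.nodup_keys_counter (pvWin s m (j+1))) (PySem.Dict.nodup_keys_counter w)).mpr h
        rw [pvDictEq_counter] at hb
        exact of_decide_eq_true hb
      · intro h
        exact (pvDictEq_eq_true_iff _ _ (PySem.Dict.nodup_keys_counter (pvWin s m (j+1))) (PySem.Dict.nodup_keys_counter w)).mp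
          (by rw [pvDictEq_counter]; exact decide_eq_true h)
    -- one loop step, then the induction hypothesis
    rw [PySem.List.pyRange_one_cons (by exact_mod_cast hmj), List.foldl_cons]
    simp only [hIn, hOutIdx, hOut]
    have ihs := ih (j+1) _ (if pvDictEq (if ((counts.insert (s[m+j]'hmj) (counts.getD (s[m+j]'hmj) 0 + 1)).getD (s[j]'hj) 0 - 1) == 0
          then (counts.insert (s[m+j]'hmj) (counts.getD (s[m+j]'hmj) 0 + 1)).erase (s[j]'hj)
          else (counts.insert (s[m+j]'hmj) (counts.getD (s[m+j]'hmj) 0 + 1)).insert (s[j]'hj)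
            ((counts.insert (s[m+j]'hmj) (counts.getD (s[m+j]'hmj) 0 + 1)).getD (s[j]'hj) 0 - 1))
          (PySem.Dict.counter w) = true then res + 1 else res)
      (by omega) hnd2 hI2
    rw [show ((m + (j+1) : Nat) : Int) = ((m + j : Nat) : Int) + 1 from by push_cast; ring] at ihs
    rw [ihs, hcmp]
    rw [List.range_succ_eq_map, List.countP_cons, List.countP_map]
    have hfun : ((fun t => pvMatch w s m (j + 1 + t)) ∘ Nat.succ) = (fun t => pvMatch w s m (j + 1 + 1 + t)) := by
      funext x
      simp only [Function.comp_apply]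
      congr 1
      omega
    rw [hfun, show pvMatch w s m (j + 1 + 0) = pvMatch w s m (j+1) from by rw [Nat.add_zero]]
    by_cases hb : pvMatch w s m (j+1) = true <;> simp [hb] <;> push_cast <;> ring

theorem pvA_eq (word sequence : String) (hw : word.toList ≠ []) :
    get_possible_occurrences_number_slow word sequence
    = (((List.range (sequence.toList.length + 1 - word.toList.length)).countP
        (pvMatch word.toList sequence.toList word.toList.length)) : Int) := by
  have hm : 1 ≤ word.toList.length := by
    cases hwl : word.toList with
    | nil => exact absurd hwl hw
    | cons a t => simp [hwl]
  unfold get_possible_occurrences_number_slow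
  simp only [PySem.Str.len_eq]
  by_cases hmn : word.toList.length ≤ sequence.toList.length
  · rw [show (sequence.toList.length : Int) - ((word.toList.length : Int) - 1)
        = ((sequence.toList.length + 1 - word.toList.length : Nat) : Int) from by omega]
    rw [show ((word.toList.length : Int) - 1) = ((word.toList.length - 1 : Nat) : Int) from by omega,
      PySem.List.slice_to_natCast]
    rw [show List.take (word.toList.length - 1) sequence.toList
        = (sequence.toList.drop 0).take (word.toList.length - 1) from by rw [List.drop_zero]]
    have hA := pvA_loop word.toList sequence.toList word.toList.length hm rfl
      (sequence.toList.length + 1 - word.toList.length) 0 0 (by omega)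
    simp only [Nat.cast_zero, zero_add, Nat.zero_add] at hA
    exact hA
  · rw [PySem.List.pyRange_one_eq_nil (by omega)]
    rw [show sequence.toList.length + 1 - word.toList.length = 0 from by omega]
    simp

theorem pvB_eq (word sequence : String) :
    get_possible_occurrences_number_slow_alt word sequence
    = (((List.range (sequence.toList.length + 1 - word.toList.length)).countP
        (pvMatch word.toList sequence.toList word.toList.length)) : Int) := by
  unfold get_possible_occurrences_number_slow_alt
  simp only [PySem.Str.len_eq]
  by_cases hmn : word.toList.length ≤ sequence.toList.length
  · rw [if_neg (by omega)]
    have htake : List.take word.toList.length sequence.toList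
        = pvWin sequence.toList word.toList.length 0 := by
      unfold pvWin
      rw [List.drop_zero]
    simp only [PySem.List.slice_to_natCast, PySem.Dict.foldl_insert_getD_add_one_eq_counter, htake]
    have hB := pvB_loop word.toList sequence.toList word.toList.length
      (sequence.toList.length - word.toList.length) 0
      (PySem.Dict.counter (pvWin sequence.toList word.toList.length 0))
      (if pvDictEq (PySem.Dict.counter (pvWin sequence.toList word.toList.length 0)) (PySem.Dict.counter word.toList) = true then 1 else 0)
      (by omega) (PySem.Dict.nodup_keys_counter _) (fun c => rfl)
    rw [show ((word.toList.length + 0 : Nat) : Int) = ((word.toList.length : Nat) : Int) from by norm_num] at hB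
    apply Eq.trans hB
    rw [pvDictEq_counter]
    have hm0 : decide ((pvWin sequence.toList word.toList.length 0).Perm word.toList)
        = pvMatch word.toList sequence.toList word.toList.length 0 := rfl
    rw [hm0]
    rw [show sequence.toList.length + 1 - word.toList.length
        = (sequence.toList.length - word.toList.length) + 1 from by omega]
    rw [List.range_succ_eq_map, List.countP_cons, List.countP_map]
    have hfun : ((fun j => pvMatch word.toList sequence.toList word.toList.length j) ∘ Nat.succ)
        = (fun t => pvMatch word.toList sequence.toList word.toList.length (0 + 1 + t)) := by
      funext x
      simp only [Function.comp_apply]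
      congr 1
      omega
    rw [show (pvMatch word.toList sequence.toList word.toList.length ∘ Nat.succ)
        = (fun t => pvMatch word.toList sequence.toList word.toList.length (0 + 1 + t)) from hfun]
    by_cases hb : pvMatch word.toList sequence.toList word.toList.length 0 = true <;>
      simp [hb] <;> push_cast <;> ring
  · rw [if_pos (by omega)]
    rw [show sequence.toList.length + 1 - word.toList.length = 0 from by omega]
    simp

-- ===== VERDICT (by name: the statement is the Claim_ definition above) =====
theorem get_possible_occurrences_number_slow_spec : Claim_equal_get_possible_occurrences_number_slow := by
  intro word sequence _ hpre
  unfold Spec_get_possible_occurrences_number_slow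
  have hw : word.toList ≠ [] := by
    intro h
    exact hpre (by rwa [← String.toList_eq_nil_iff])
  rw [pvA_eq word sequence hw, pvB_eq word sequence]
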